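-- pv_equiv track=rewrite | github.com/Djet78/hillel_homework_repository | test_6.py | is_list_isogram
-- ===== SOURCE A (Python) =====
-- def is_list_isogram(lst):
--     """
--     Checks is all words in given list an isogram
--     :param lst: takes given string
--     :return: boolean value
--     """
--     for elem in lst:
--         elem = elem.replace(" ", "")
--         elem = elem.lower()
--         i = 0
--         for char in elem:
--             repetitions = elem.count(char, i, len(elem))
--             i += 1
--             if repetitions > 1:
--                 return False
--     return True
-- ===== SOURCE B (Python) =====
-- def is_list_isogram(lst):
--     """
--     Checks is all words in given list an isogram
--     :param lst: takes given string
--     :return: boolean value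
--     """
--     return all(
--         len(cleaned) == len(set(cleaned))
--         for cleaned in (elem.replace(" ", "").lower() for elem in lst)
--     )
-- ===== Notes on version B (the rewrite author's own statement) =====
-- stated objective: idiomatic
-- what changed: Replaced the indexed inner loop that counts each character in the remaining suffix with a single len(cleaned) == len(set(cleaned)) cardinality check per word, folded into one all(...) expression.
import Mathlib
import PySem

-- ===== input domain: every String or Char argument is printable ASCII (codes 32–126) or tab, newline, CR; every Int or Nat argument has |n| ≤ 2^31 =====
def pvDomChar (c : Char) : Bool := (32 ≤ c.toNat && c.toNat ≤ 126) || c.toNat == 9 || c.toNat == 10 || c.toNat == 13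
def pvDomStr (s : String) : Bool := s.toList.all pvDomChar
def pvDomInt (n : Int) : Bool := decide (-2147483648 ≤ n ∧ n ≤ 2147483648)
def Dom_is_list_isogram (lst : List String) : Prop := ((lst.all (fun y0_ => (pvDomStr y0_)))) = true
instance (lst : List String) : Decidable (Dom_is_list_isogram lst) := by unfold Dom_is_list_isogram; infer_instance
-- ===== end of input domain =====

-- B replaces A's per-character suffix-count inner loop by a len == len(set) cardinality check per word (idiomatic).

-- ===== PORT A =====
-- inner 'for char in elem' loop: first arg is the full cleaned word, second the chars
-- still to visit, third the running index i.  'elem.count(char, i, len(elem))' on a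
-- one-character substring is exactly the number of occurrences of that character in
-- the slice elem[i:len(elem)] (exact: single chars cannot overlap).
def isogramInnerA (elem : List Char) : List Char → Int → Bool
  | [], _ => true
  | c :: rest, i =>
    let repetitions := (PySem.List.slice elem (some i) (some (PySem.List.len elem))).count c
    if repetitions > 1 then false else isogramInnerA elem rest (i + 1)

def is_list_isogram : List String → Bool
  | [] => true
  | s :: rest =>
    let elem := (PySem.Str.lower (PySem.Str.replace s " " "")).toList
    if isogramInnerA elem elem 0 then is_list_isogram rest else false

-- ===== PORT B =====
def is_list_isogram_alt (lst : List String) : Bool :=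
  lst.all (fun elem =>
    let cleaned := (PySem.Str.lower (PySem.Str.replace elem " " "")).toList
    PySem.List.len cleaned == (PySem.Set.len (PySem.Set.ofList cleaned) : Int))

-- ===== PRECONDITION & SPEC =====
def Spec_is_list_isogram (lst : List String) (out : Bool) : Prop := out = is_list_isogram_alt lst
instance (lst : List String) (out : Bool) : Decidable (Spec_is_list_isogram lst out) := by unfold Spec_is_list_isogram; infer_instance

-- ===== CLAIM (what is proved, stated in full; the proofs are below) =====
def Claim_equal_is_list_isogram : Prop := ∀ (lst : List String), Dom_is_list_isogram lst → Spec_is_list_isogram lst (is_list_isogram lst)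

-- ===== LEMMAS AND PROOFS =====

-- the inner loop, started on the suffix l.drop k with index k, decides Nodup of that suffix
lemma isogramInnerA_drop (l : List Char) : ∀ (t : List Char) (k : Nat), t = l.drop k →
    isogramInnerA l t (k : Int) = decide t.Nodup := by
  intro t
  induction t with
  | nil => intro k _; simp [isogramInnerA]
  | cons c rest ih =>
    intro k hk
    have hslice : PySem.List.slice l (some (k : Int)) (some ((l.length : Nat) : Int)) = c :: rest := by
      rw [PySem.List.slice_natCast, List.take_of_length_le (by simp)]
      exact hk.symm
    have hrest : rest = l.drop (k + 1) := by
      have := congrArg List.tail hk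
      simpa [List.tail_drop] using this
    by_cases hc : c ∈ rest
    · simp [isogramInnerA, hslice, List.nodup_cons, hc]
    · have h1 : (c :: rest).count c = 1 := by
        simp [List.count_cons_self, List.count_eq_zero_of_not_mem hc]
      have hrec := ih (k + 1) hrest
      simp [isogramInnerA, hslice, h1, hc]
      rw [show ((k : Int) + 1) = ((k + 1 : Nat) : Int) by push_cast; ring]
      exact hrec

-- (Set.ofList xs).length = xs.length iff xs has no duplicates
lemma ofList_length_eq_iff (xs : List Char) : (PySem.Set.ofList xs).length = xs.length ↔ xs.Nodup := by
  constructor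
  · intro h
    have hperm : (PySem.Set.ofList xs).Perm xs.dedup := by
      refine (List.perm_ext_iff_of_nodup (PySem.Set.nodup_ofList xs) xs.nodup_dedup).mpr ?_
      intro a; rw [PySem.Set.mem_ofList, List.mem_dedup]
    have hlen : xs.dedup.length = xs.length := by rw [← hperm.length_eq, h]
    have hself : xs.dedup = xs := (List.dedup_sublist xs).eq_of_length hlen
    exact hself ▸ xs.nodup_dedup
  · intro h; rw [PySem.Set.ofList_eq_self_of_nodup xs h]

lemma word_nodup_bool (l : List Char) :
    decide l.Nodup = ((l.length : Int) == (PySem.Set.len (PySem.Set.ofList l) : Int)) := by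
  rcases Decidable.em l.Nodup with h | h
  · simp [PySem.Set.len, h, PySem.Set.ofList_eq_self_of_nodup l h]
  · have hne : (PySem.Set.ofList l).length ≠ l.length := fun he => h ((ofList_length_eq_iff l).mp he)
    simp [PySem.Set.len, h]
    omega

lemma word_check_eq (s : String) :
    isogramInnerA ((PySem.Str.lower (PySem.Str.replace s " " "")).toList)
        ((PySem.Str.lower (PySem.Str.replace s " " "")).toList) 0 =
    ((PySem.List.len ((PySem.Str.lower (PySem.Str.replace s " " "")).toList) : Int) ==
      (PySem.Set.len (PySem.Set.ofList ((PySem.Str.lower (PySem.Str.replace s " " "")).toList)) : Int)) := by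
  have h0 := isogramInnerA_drop ((PySem.Str.lower (PySem.Str.replace s " " "")).toList)
      ((PySem.Str.lower (PySem.Str.replace s " " "")).toList) 0 (by simp)
  rw [show ((0 : Nat) : Int) = (0 : Int) from rfl] at h0
  rw [h0, PySem.List.len_eq, word_nodup_bool]

lemma main_eq (lst : List String) : is_list_isogram lst = is_list_isogram_alt lst := by
  induction lst with
  | nil => rfl
  | cons s rest ih =>
    show (if isogramInnerA ((PySem.Str.lower (PySem.Str.replace s " " "")).toList)
              ((PySem.Str.lower (PySem.Str.replace s " " "")).toList) 0
          then is_list_isogram rest else false) =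
        (((PySem.List.len ((PySem.Str.lower (PySem.Str.replace s " " "")).toList) : Int) ==
          (PySem.Set.len (PySem.Set.ofList ((PySem.Str.lower (PySem.Str.replace s " " "")).toList)) : Int)) &&
          is_list_isogram_alt rest)
    rw [word_check_eq s, ih]
    cases hb : ((PySem.List.len ((PySem.Str.lower (PySem.Str.replace s " " "")).toList) : Int) ==
        (PySem.Set.len (PySem.Set.ofList ((PySem.Str.lower (PySem.Str.replace s " " "")).toList)) : Int)) <;>
      simp

-- ===== VERDICT (by name: the statement is the Claim_ definition above) =====
theorem is_list_isogram_spec : Claim_equal_is_list_isogram := by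
  intro lst _
  unfold Spec_is_list_isogram
  exact main_eq lst
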